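-- pv_equiv track=rewrite | github.com/Knapol/ASD | Sortowania/Zadania/najladniejsze_liczby.py | convert
-- ===== SOURCE A (Python) =====
-- def convert(num):
--     tmp = num
--     tab = [0]*10
--     while tmp > 0:
--         tab[tmp%10]+=1
--         tmp //= 10
--
--     single = 0
--     multiple = 0
--
--     for i in range(10):
--         if tab[i] == 1:
--             single+=1
--         if tab[i] > 1:
--             multiple+=1
--
--     return (num, single, multiple)
-- ===== SOURCE B (Python) =====
-- def convert(num):
--     ds = sorted(str(num)) if num > 0 else []
--     single = 0
--     multiple = 0
--     while ds:
--         head = ds[0]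
--         run = 0
--         while ds and ds[0] == head:
--             ds = ds[1:]
--             run += 1
--         if run == 1:
--             single += 1
--         else:
--             multiple += 1
--     return (num, single, multiple)
-- ===== Notes on version B (the rewrite author's own statement) =====
-- stated objective: alternative
-- what changed: B replaces A's arithmetic digit-peeling into a dense 0..9 count array plus a second tally pass by sorting the digit characters of str(num) and classifying runs in a single run-length scan over the sorted list (no count table at all).
import Mathlib
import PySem

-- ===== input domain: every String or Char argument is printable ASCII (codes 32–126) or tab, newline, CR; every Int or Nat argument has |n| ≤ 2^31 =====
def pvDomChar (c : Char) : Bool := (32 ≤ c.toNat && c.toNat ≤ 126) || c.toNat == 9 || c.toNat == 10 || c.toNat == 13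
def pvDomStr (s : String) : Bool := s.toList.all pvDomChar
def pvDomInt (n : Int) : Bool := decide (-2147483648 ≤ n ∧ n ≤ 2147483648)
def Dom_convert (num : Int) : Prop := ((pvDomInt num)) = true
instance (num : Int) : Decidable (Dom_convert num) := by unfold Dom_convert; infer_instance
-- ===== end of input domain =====

-- B replaces A's arithmetic digit-peeling into a dense 0..9 count array plus a second tally pass
-- by sorting the digit characters of str(num) and classifying runs in one run-length scan
-- over the sorted list (no count table at all).

-- ===== PORT A =====
-- while tmp > 0: tab[tmp%10] += 1; tmp //= 10
-- (the index tmp % 10 is always in 0..9 < len(tab) = 10, so pyGetD/pySetD defaults are never used)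
def convertLoop (tmp : Int) (tab : List Int) : List Int :=
  if _h : tmp > 0 then
    convertLoop (PySem.Int.floordiv tmp 10)
      (PySem.List.pySetD tab (PySem.Int.mod tmp 10)
        (PySem.List.pyGetD tab (PySem.Int.mod tmp 10) 0 + 1))
  else tab
termination_by tmp.toNat
decreasing_by
  have : PySem.Int.floordiv tmp 10 = tmp / 10 := PySem.Int.floordiv_eq_ediv_of_pos (by omega)
  rw [this]; omega

def convert (num : Int) : Int × Int × Int :=
  let tab := convertLoop num (List.replicate 10 0)
  -- for i in range(10): if tab[i] == 1: single += 1; if tab[i] > 1: multiple += 1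
  let sm := (PySem.List.pyRange 0 10 1).foldl
    (fun (sm : Int × Int) i =>
      let s := if PySem.List.pyGetD tab i 0 = 1 then sm.1 + 1 else sm.1
      let m := if PySem.List.pyGetD tab i 0 > 1 then sm.2 + 1 else sm.2
      (s, m)) (0, 0)
  (num, sm.1, sm.2)

-- ===== PORT B =====
-- inner loop: while ds and ds[0] == head: ds = ds[1:]; run += 1
def stripRun (head : Char) : List Char → Int → List Char × Int
  | [], run => ([], run)
  | c :: rest, run => if c = head then stripRun head rest (run + 1) else (c :: rest, run)

-- termination facts for the outer while loop (cited by runScan's decreasing_by)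
lemma stripRun_length_le (head : Char) :
    ∀ (l : List Char) (r : Int), (stripRun head l r).1.length ≤ l.length := by
  intro l
  induction l with
  | nil => intro r; simp [stripRun]
  | cons c rest ih =>
    intro r
    by_cases h : c = head
    · simp only [stripRun, if_pos h]
      exact le_trans (ih (r + 1)) (by simp)
    · simp [stripRun, h]

lemma stripRun_cons_self (head : Char) (t : List Char) (r : Int) :
    stripRun head (head :: t) r = stripRun head t (r + 1) := by
  simp [stripRun]

-- outer loop: while ds: head = ds[0]; run = 0; <inner loop>; classify run
def runScan (ds : List Char) (s m : Int) : Int × Int :=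
  match ds with
  | [] => (s, m)
  | head :: t =>
    let p := stripRun head (head :: t) 0
    if p.2 = 1 then runScan p.1 (s + 1) m else runScan p.1 s (m + 1)
termination_by ds.length
decreasing_by
  all_goals
    (rw [stripRun_cons_self]
     exact Nat.lt_succ_of_le (stripRun_length_le head t (0 + 1)))

def convert_alt (num : Int) : Int × Int × Int :=
  let ds := if num > 0 then PySem.List.sorted (PySem.Int.toStr num).toList (fun x => x) false
            else []
  let sm := runScan ds 0 0
  (num, sm.1, sm.2)

-- ===== PRECONDITION & SPEC =====
def Spec_convert (num : Int) (out : Int × Int × Int) : Prop := out = convert_alt num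
instance (num : Int) (out : Int × Int × Int) : Decidable (Spec_convert num out) := by unfold Spec_convert; infer_instance

-- ===== CLAIM (what is proved, stated in full; the proofs are below) =====
def Claim_equal_convert : Prop := ∀ (num : Int), Dom_convert num → Spec_convert num (convert num)

-- ===== LEMMAS AND PROOFS =====

-- digits of n, least significant first (empty for 0)
def pdigs (n : Nat) : List Nat :=
  if h : n = 0 then [] else n % 10 :: pdigs (n / 10)
termination_by n
decreasing_by exact Nat.div_lt_self (Nat.pos_of_ne_zero h) (by omega)

lemma pdigs_zero : pdigs 0 = [] := by rw [pdigs]; simp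

lemma pdigs_pos (n : Nat) (h : n ≠ 0) : pdigs n = n % 10 :: pdigs (n / 10) := by
  rw [pdigs]; simp [h]

lemma pdigs_lt (n : Nat) : ∀ e ∈ pdigs n, e < 10 := by
  induction n using Nat.strong_induction_on with
  | _ n ih =>
    by_cases h : n = 0
    · simp [h, pdigs_zero]
    · rw [pdigs_pos n h]
      intro e he
      rcases List.mem_cons.1 he with rfl | he
      · omega
      · exact ih (n / 10) (Nat.div_lt_self (Nat.pos_of_ne_zero h) (by omega)) e he

lemma toDigitsCore_eq (f : Nat) : ∀ (n : Nat) (l : List Char), 0 < n → n < f →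
    Nat.toDigitsCore 10 f n l = (pdigs n).reverse.map Nat.digitChar ++ l := by
  induction f with
  | zero => intro n l h1 h2; omega
  | succ f ih =>
    intro n l h1 h2
    rw [Nat.toDigitsCore]
    by_cases hd : n / 10 = 0
    · have h10 : n < 10 := by omega
      have : pdigs n = [n % 10] := by rw [pdigs_pos n (by omega), hd, pdigs_zero]
      simp [hd, this]
    · have hdf : n / 10 < f := by
        have := Nat.div_lt_self h1 (show 1 < 10 by omega); omega
      simp only [hd, if_false]
      rw [ih (n / 10) _ (Nat.pos_of_ne_zero hd) hdf, pdigs_pos n (by omega)]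
      simp

lemma toChars_eq (n : Nat) (h : 0 < n) :
    PySem.Int.toChars (n : Int) = (pdigs n).reverse.map Nat.digitChar := by
  have : ¬ ((n : Int) < 0) := by omega
  simp only [PySem.Int.toChars, this, if_false, Int.toNat_natCast, Nat.toDigits]
  rw [toDigitsCore_eq (n + 1) n [] h (by omega)]
  simp

-- A's while loop, on a nonnegative input, is a fold over pdigs
lemma convertLoop_eq (n : Nat) : ∀ (tab : List Int),
    convertLoop (n : Int) tab
      = (pdigs n).foldl (fun t d => t.set d (t.getD d 0 + 1)) tab := by
  induction n using Nat.strong_induction_on with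
  | _ n ih =>
    intro tab
    by_cases h : n = 0
    · rw [convertLoop]; simp [h, pdigs_zero]
    · rw [convertLoop]
      have hpos : (n : Int) > 0 := by omega
      have hfd : PySem.Int.floordiv (n : Int) 10 = ((n / 10 : Nat) : Int) := by
        exact_mod_cast PySem.Int.floordiv_natCast n 10
      have hmd : PySem.Int.mod (n : Int) 10 = ((n % 10 : Nat) : Int) := by
        exact_mod_cast PySem.Int.mod_natCast n 10
      rw [dif_pos hpos, hfd, hmd, PySem.List.pySetD_natCast, PySem.List.pyGetD_natCast,
        ih (n / 10) (Nat.div_lt_self (Nat.pos_of_ne_zero h) (by omega)), pdigs_pos n h]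
      simp

lemma foldl_set_length (l : List Nat) : ∀ (tab : List Int),
    (l.foldl (fun t d => t.set d (t.getD d 0 + 1)) tab).length = tab.length := by
  induction l with
  | nil => intro tab; rfl
  | cons e l ih => intro tab; rw [List.foldl_cons, ih]; simp

lemma foldl_set_getD (l : List Nat) : ∀ (tab : List Int) (d : Nat), d < tab.length →
    (∀ e ∈ l, e < tab.length) →
    (l.foldl (fun t d => t.set d (t.getD d 0 + 1)) tab).getD d 0
      = tab.getD d 0 + (l.count d : Int) := by
  induction l with
  | nil => intro tab d _ _; simp
  | cons e l ih =>
    intro tab d hd hl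
    rw [List.foldl_cons, ih _ d (by simpa using hd) (by intro x hx; simpa using hl x (by simp [hx]))]
    have he : e < tab.length := hl e (by simp)
    by_cases hde : d = e
    · subst hde
      rw [List.getD_eq_getElem _ _ (by simpa using hd), List.getElem_set_self,
          List.getD_eq_getElem _ _ hd]
      rw [List.count_cons]
      simp
      ring
    · rw [List.getD_eq_getElem _ _ (by simpa using hd), List.getElem_set_ne (by omega),
          List.getD_eq_getElem _ _ hd, List.count_cons]
      have hne : ¬ e = d := fun h => hde h.symm
      simp [hne]

lemma count_fold_pair {α : Type} (P Q : α → Prop) [DecidablePred P] [DecidablePred Q] (l : List α) :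
    ∀ (s m : Int),
    (l.foldl (fun (sm : Int × Int) (i : α) =>
        let a := if P i then sm.1 + 1 else sm.1
        let b := if Q i then sm.2 + 1 else sm.2
        (a, b)) (s, m))
      = (s + (l.countP (fun i => decide (P i)) : Int), m + (l.countP (fun i => decide (Q i)) : Int)) := by
  induction l with
  | nil => intro s m; simp
  | cons x l ih =>
    intro s m
    rw [List.foldl_cons, ih]
    by_cases hp : P x <;> by_cases hq : Q x <;> simp [hp, hq] <;> ring_nf <;> simp

lemma digitChar_inj (d1 d2 : Nat) (h1 : d1 < 10) (h2 : d2 < 10)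
    (h : Nat.digitChar d1 = Nat.digitChar d2) : d1 = d2 := by
  interval_cases d1 <;> interval_cases d2 <;> revert h <;> decide

lemma count_map_digitChar (d : Nat) (hd : d < 10) (l : List Nat) (hl : ∀ e ∈ l, e < 10) :
    (l.map Nat.digitChar).count (Nat.digitChar d) = l.count d := by
  induction l with
  | nil => rfl
  | cons e l ih =>
    have he : e < 10 := hl e (by simp)
    have hinj : Nat.digitChar e = Nat.digitChar d ↔ e = d :=
      ⟨fun h => digitChar_inj e d he hd h, fun h => by rw [h]⟩
    rw [List.map_cons, List.count_cons, List.count_cons, ih (fun x hx => hl x (by simp [hx]))]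
    by_cases hde : e = d
    · simp [hde]
    · simp [hde, (by simpa [hinj] using hde : ¬ Nat.digitChar e = Nat.digitChar d)]

-- the central bridge: classifying the multiplicities of the distinct digit characters
-- equals classifying the dense 0..9 digit counts
lemma bridge (n : Nat) (p : Nat → Bool) (hp0 : p 0 = false) :
    ((PySem.Set.ofList ((pdigs n).reverse.map Nat.digitChar)).countP
        (fun c => p (((pdigs n).reverse.map Nat.digitChar).count c)))
      = ((List.range 10).countP (fun d => p ((pdigs n).count d))) := by
  set ds := (pdigs n).reverse.map Nat.digitChar with hds
  have hcount : ∀ d : Nat, d < 10 → ds.count (Nat.digitChar d) = (pdigs n).count d := by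
    intro d hd
    rw [hds, count_map_digitChar d hd _ (by intro e he; exact pdigs_lt n e (by simpa using he)),
        List.count_reverse]
  have hmem : ∀ c : Char, c ∈ ds → ∃ d : Nat, d < 10 ∧ c = Nat.digitChar d ∧ d ∈ pdigs n := by
    intro c hc
    rw [hds] at hc
    rcases List.mem_map.1 hc with ⟨d, hdm, rfl⟩
    exact ⟨d, pdigs_lt n d (by simpa using hdm), rfl, by simpa using hdm⟩
  rw [List.countP_eq_length_filter, List.countP_eq_length_filter]
  have hnodupL : ((PySem.Set.ofList ds).filter (fun c => p (ds.count c))).Nodup :=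
    (PySem.Set.nodup_ofList ds).filter _
  have hnodupR : ((List.range 10).filter (fun d => p ((pdigs n).count d))).Nodup :=
    (List.nodup_range).filter _
  rw [← List.toFinset_card_of_nodup hnodupL, ← List.toFinset_card_of_nodup hnodupR]
  apply Finset.card_bij (fun c _ => if h : ∃ d : Nat, d < 10 ∧ c = Nat.digitChar d then h.choose else 0)
  · intro c hc
    rw [List.mem_toFinset, List.mem_filter] at hc
    obtain ⟨hcm, hcp⟩ := hc
    rcases hmem c ((PySem.Set.mem_ofList ds c).1 hcm) with ⟨d, hd10, rfl, hdm⟩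
    have hex : ∃ e : Nat, e < 10 ∧ Nat.digitChar d = Nat.digitChar e := ⟨d, hd10, rfl⟩
    rw [dif_pos hex]
    obtain ⟨he10, heq⟩ := hex.choose_spec
    have : hex.choose = d := (digitChar_inj d hex.choose hd10 he10 heq).symm
    rw [List.mem_toFinset, List.mem_filter, this]
    refine ⟨by simp [hd10], ?_⟩
    rwa [← hcount d hd10]
  · intro c1 hc1 c2 hc2 heq
    rw [List.mem_toFinset, List.mem_filter] at hc1 hc2
    rcases hmem c1 ((PySem.Set.mem_ofList ds c1).1 hc1.1) with ⟨d1, hd1, rfl, _⟩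
    rcases hmem c2 ((PySem.Set.mem_ofList ds c2).1 hc2.1) with ⟨d2, hd2, rfl, _⟩
    have hex1 : ∃ e : Nat, e < 10 ∧ Nat.digitChar d1 = Nat.digitChar e := ⟨d1, hd1, rfl⟩
    have hex2 : ∃ e : Nat, e < 10 ∧ Nat.digitChar d2 = Nat.digitChar e := ⟨d2, hd2, rfl⟩
    rw [dif_pos hex1, dif_pos hex2] at heq
    obtain ⟨he1, heq1⟩ := hex1.choose_spec
    obtain ⟨he2, heq2⟩ := hex2.choose_spec
    rw [heq1, heq2, heq]
  · intro d hd
    rw [List.mem_toFinset, List.mem_filter, List.mem_range] at hd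
    obtain ⟨hd10, hdp⟩ := hd
    have hdm : d ∈ pdigs n := by
      by_contra hnm
      rw [List.count_eq_zero_of_not_mem hnm] at hdp
      simp [hp0] at hdp
    refine ⟨Nat.digitChar d, ?_, ?_⟩
    · rw [List.mem_toFinset, List.mem_filter]
      refine ⟨(PySem.Set.mem_ofList ds _).2 ?_, by rwa [hcount d hd10]⟩
      rw [hds]; exact List.mem_map.2 ⟨d, by simpa using hdm, rfl⟩
    · have hex : ∃ e : Nat, e < 10 ∧ Nat.digitChar d = Nat.digitChar e := ⟨d, hd10, rfl⟩
      rw [dif_pos hex]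
      obtain ⟨he10, heq⟩ := hex.choose_spec
      exact (digitChar_inj d hex.choose hd10 he10 heq).symm

-- ── B-side lemmas: the run scan of a sorted list classifies multiplicities ──

lemma stripRun_eq (head : Char) : ∀ (l : List Char) (r : Int),
    stripRun head l r
      = (l.dropWhile (fun c => c == head), r + ((l.takeWhile (fun c => c == head)).length : Int)) := by
  intro l
  induction l with
  | nil => intro r; simp [stripRun]
  | cons c rest ih =>
    intro r
    by_cases h : c = head
    · rw [show stripRun head (c :: rest) r = stripRun head rest (r + 1) by simp [stripRun, h],
        ih (r + 1)]
      simp [h]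
      ring
    · simp [stripRun, h]

lemma update_cons_notmem {x : Char} : ∀ (l : List Char) (s : List Char), x ∉ l →
    PySem.Set.update (x :: s) l = x :: PySem.Set.update s l := by
  intro l
  induction l with
  | nil => intro s _; rfl
  | cons c rest ih =>
    intro s hx
    have hcx : ¬ (c = x) := fun h => hx (by simp [h])
    have hadd : PySem.Set.add (x :: s) c = x :: PySem.Set.add s c := by
      simp [PySem.Set.add, PySem.Set.contains, hcx]
      by_cases hcs : c ∈ s <;> simp [hcs]
    calc PySem.Set.update (x :: s) (c :: rest)
        = PySem.Set.update (PySem.Set.add (x :: s) c) rest := rfl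
      _ = PySem.Set.update (x :: PySem.Set.add s c) rest := by rw [hadd]
      _ = x :: PySem.Set.update (PySem.Set.add s c) rest := ih _ (fun h => hx (by simp [h]))
      _ = x :: PySem.Set.update s (c :: rest) := rfl

lemma update_subset_eq : ∀ (l : List Char) (s : List Char), (∀ c ∈ l, c ∈ s) →
    PySem.Set.update s l = s := by
  intro l
  induction l with
  | nil => intro s _; rfl
  | cons c rest ih =>
    intro s h
    have hadd : PySem.Set.add s c = s := by
      simp [PySem.Set.add, PySem.Set.contains, h c (by simp)]
    calc PySem.Set.update s (c :: rest)
        = PySem.Set.update (PySem.Set.add s c) rest := rfl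
      _ = s := by rw [hadd]; exact ih s (fun d hd => h d (by simp [hd]))

lemma update_append (s : List Char) (l1 l2 : List Char) :
    PySem.Set.update s (l1 ++ l2) = PySem.Set.update (PySem.Set.update s l1) l2 :=
  List.foldl_append

-- Set.ofList of a sorted-shaped list head :: (run of head) ++ rest with head ∉ rest
lemma ofList_run (head : Char) (tw rest : List Char)
    (htw : ∀ c ∈ tw, c = head) (hrest : head ∉ rest) :
    PySem.Set.ofList (head :: (tw ++ rest)) = head :: PySem.Set.ofList rest := by
  have h1 : PySem.Set.ofList (head :: (tw ++ rest))
      = PySem.Set.update [head] (tw ++ rest) := rfl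
  rw [h1, update_append, update_subset_eq tw [head] (by intro c hc; simp [htw c hc]),
    show ([head] : List Char) = head :: ([] : List Char) from rfl,
    update_cons_notmem rest [] hrest]
  rfl

lemma runScan_sorted_aux (N : Nat) : ∀ (l : List Char), l.length ≤ N → l.Pairwise (· ≤ ·) →
    ∀ (s m : Int),
    runScan l s m
      = (s + ((PySem.Set.ofList l).countP (fun c => decide (l.count c = 1)) : Int),
         m + ((PySem.Set.ofList l).countP (fun c => decide (1 < l.count c)) : Int)) := by
  induction N with
  | zero =>
    intro l hl _ s m
    have : l = [] := List.length_eq_zero_iff.1 (by omega)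
    subst this
    simp [runScan, PySem.Set.ofList]
  | succ N ih =>
    intro l hl
    match l with
    | [] => intro _ s m; simp [runScan, PySem.Set.ofList]
    | head :: t =>
      intro hsort s m
      set tw := t.takeWhile (fun c => c == head) with htw
      set rest := t.dropWhile (fun c => c == head) with hrest
      have ht : t = tw ++ rest := (List.takeWhile_append_dropWhile).symm
      have htw_all : ∀ c ∈ tw, c = head := by
        intro c hc
        have := List.mem_takeWhile_imp hc
        simpa using this
      have hhead_le : ∀ c ∈ t, head ≤ c := by
        intro c hc; exact (List.pairwise_cons.1 hsort).1 c hc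
      have hrest_pw : rest.Pairwise (· ≤ ·) :=
        List.Pairwise.sublist (List.dropWhile_sublist _) ((List.pairwise_cons.1 hsort).2)
      have hrest_sub : ∀ c ∈ rest, c ∈ t := fun c hc => (List.dropWhile_sublist _).mem hc
      have hhead_notmem : head ∉ rest := by
        intro hmem
        cases hr : rest with
        | nil => rw [hr] at hmem; simp at hmem
        | cons x r' =>
          have hx : ¬ (x == head) = true := by
            have := List.head?_dropWhile_not (fun c => c == head) t
            rw [← hrest, hr] at this
            simpa using this
          have hxne : x ≠ head := by simpa using hx
          have hxle : head ≤ x := hhead_le x (hrest_sub x (by simp [hr]))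
          have hxlt : head < x := lt_of_le_of_ne hxle (Ne.symm hxne)
          rw [hr] at hmem
          rcases List.mem_cons.1 hmem with rfl | hmem'
          · exact hxne rfl
          · have : x ≤ head := by
              rw [hr] at hrest_pw
              exact (List.pairwise_cons.1 hrest_pw).1 head hmem'
            exact absurd (lt_of_lt_of_le hxlt this) (lt_irrefl head)
      -- the strip step
      have hstrip : stripRun head (head :: t) 0 = (rest, 1 + (tw.length : Int)) := by
        rw [stripRun_cons_self, stripRun_eq]
        simp [htw, hrest]
      -- counts in l
      have htwc : tw.count head = tw.length :=
        List.count_eq_length.2 (fun b hb => ((htw_all b hb).symm : head = b) ▸ rfl)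
      have hcount_head : (head :: t).count head = 1 + tw.length := by
        rw [ht, List.count_cons_self, List.count_append, htwc,
          List.count_eq_zero_of_not_mem hhead_notmem]
        omega
      have hcount_other : ∀ c, c ≠ head → (head :: t).count c = rest.count c := by
        intro c hc
        have htw0 : tw.count c = 0 :=
          List.count_eq_zero_of_not_mem (fun hm => hc (htw_all c hm))
        rw [ht]
        simp [List.count_append, htw0, Ne.symm hc]
      -- the distinct elements
      have hset : PySem.Set.ofList (head :: t) = head :: PySem.Set.ofList rest := by
        rw [ht]; exact ofList_run head tw rest htw_all hhead_notmem
      have hcongr1 : (PySem.Set.ofList rest).countP (fun c => decide ((head :: t).count c = 1))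
          = (PySem.Set.ofList rest).countP (fun c => decide (rest.count c = 1)) := by
        apply List.countP_congr
        intro c hcm
        have : c ≠ head := fun h => hhead_notmem (h ▸ (PySem.Set.mem_ofList rest c).1 hcm)
        simp [hcount_other c this]
      have hcongr2 : (PySem.Set.ofList rest).countP (fun c => decide (1 < (head :: t).count c))
          = (PySem.Set.ofList rest).countP (fun c => decide (1 < rest.count c)) := by
        apply List.countP_congr
        intro c hcm
        have : c ≠ head := fun h => hhead_notmem (h ▸ (PySem.Set.mem_ofList rest c).1 hcm)
        simp [hcount_other c this]
      have hrest_len : rest.length ≤ N := by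
        have := List.length_dropWhile_le (fun c => c == head) t
        simp only [← hrest] at this
        simp at hl
        omega
      have hih := ih rest hrest_len hrest_pw
      -- unfold one step of runScan
      rw [runScan]
      simp only [hstrip]
      by_cases h1 : (1 + (tw.length : Int)) = 1
      · -- run == 1: tw = [], count head l = 1
        have htw0 : tw.length = 0 := by omega
        have hch : ((head :: t).count head = 1) := by rw [hcount_head, htw0]
        rw [if_pos h1, hih (s + 1) m, hset, List.countP_cons, List.countP_cons,
          hcongr1, hcongr2, hch]
        simp only [Prod.mk.injEq, decide_true]
        have e1 : (if True then (1:Nat) else 0) = 1 := if_pos trivial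
        have e2 : (if decide ((1:Nat) < 1) = true then (1:Nat) else 0) = 0 := rfl
        rw [e1, e2]
        constructor <;> omega
      · -- run > 1: count head l > 1
        have hch : (head :: t).count head = 1 + tw.length := hcount_head
        have htw1 : 1 ≤ tw.length := by omega
        rw [if_neg h1, hih s (m + 1), hset, List.countP_cons, List.countP_cons,
          hcongr1, hcongr2, hch]
        have e1 : (decide (1 + tw.length = 1)) = false := by
          rw [decide_eq_false_iff_not]; omega
        have e2 : (decide (1 < 1 + tw.length)) = true := by
          rw [decide_eq_true_eq]; omega
        rw [e1, e2]
        have f1 : (if false = true then (1:Nat) else 0) = 0 := rfl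
        have f2 : (if true = true then (1:Nat) else 0) = 1 := rfl
        rw [f1, f2]
        simp only [Prod.mk.injEq]
        constructor <;> omega

-- countP agrees on two nodup lists with the same members
lemma countP_eq_of_mem_iff (l1 l2 : List Char) (h1 : l1.Nodup) (h2 : l2.Nodup)
    (h : ∀ x, x ∈ l1 ↔ x ∈ l2) (p : Char → Bool) : l1.countP p = l2.countP p := by
  refine (List.perm_of_nodup_nodup_toFinset_eq h1 h2 ?_).countP_eq p
  ext x; simp [h x]

theorem convert_spec_aux (num : Int) : convert num = convert_alt num := by
  simp only [convert, convert_alt]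
  by_cases hpos : num > 0
  · have hn : num = (num.toNat : Int) := by omega
    set n := num.toNat with hnn
    have hn0 : 0 < n := by omega
    set ds := (pdigs n).reverse.map Nat.digitChar with hds
    -- A side
    set tabF := (pdigs n).foldl (fun t d => t.set d (t.getD d 0 + 1)) (List.replicate 10 (0 : Int))
      with htabF
    have hlen : tabF.length = 10 := by rw [htabF, foldl_set_length]; simp
    have hgetD : ∀ d : Nat, d < 10 → tabF.getD d 0 = ((pdigs n).count d : Int) := by
      intro d hd
      rw [htabF, foldl_set_getD _ _ d (by simpa using hd)
        (by intro e he; simpa using pdigs_lt n e he)]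
      rw [List.getD_eq_getElem _ _ (by simpa using hd)]
      interval_cases d <;> simp
    have hA : convertLoop num (List.replicate 10 0) = tabF := by
      rw [hn, convertLoop_eq]
    rw [hA]
    have hr : PySem.List.pyRange 0 10 1 = (List.range 10).map (fun k : Nat => (k : Int)) := by
      decide
    rw [hr, List.foldl_map,
      count_fold_pair (fun k : Nat => PySem.List.pyGetD tabF (k : Int) 0 = 1)
        (fun k : Nat => PySem.List.pyGetD tabF (k : Int) 0 > 1) (List.range 10) 0 0]
    -- B side
    have hsl : (PySem.Int.toStr num).toList = ds := by
      rw [PySem.Int.toList_toStr, hn, toChars_eq n hn0]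
    rw [if_pos hpos, hsl]
    set sds := PySem.List.sorted ds (fun x => x) false with hsds
    have hperm : sds.Perm ds := PySem.List.sorted_perm ds (fun x => x) false
    have hpw : sds.Pairwise (· ≤ ·) := by
      have := PySem.List.sorted_pairwise ds (fun x => x)
      simpa using this
    rw [runScan_sorted_aux sds.length sds (le_refl _) hpw 0 0]
    -- transfer the run-scan classification from sds back to ds
    have hcnt : ∀ c, sds.count c = ds.count c := fun c => hperm.count_eq c
    have hmm : ∀ x, x ∈ PySem.Set.ofList sds ↔ x ∈ PySem.Set.ofList ds := by
      intro x
      rw [PySem.Set.mem_ofList, PySem.Set.mem_ofList, hperm.mem_iff]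
    have hc1 : (PySem.Set.ofList sds).countP (fun c => decide (sds.count c = 1))
        = (PySem.Set.ofList ds).countP (fun c => decide (ds.count c = 1)) := by
      have h1 : (PySem.Set.ofList sds).countP (fun c => decide (sds.count c = 1))
          = (PySem.Set.ofList sds).countP (fun c => decide (ds.count c = 1)) :=
        List.countP_congr (fun c _ => by simp [hcnt c])
      rw [h1]
      exact countP_eq_of_mem_iff _ _ (PySem.Set.nodup_ofList sds) (PySem.Set.nodup_ofList ds) hmm _
    have hc2 : (PySem.Set.ofList sds).countP (fun c => decide (1 < sds.count c))
        = (PySem.Set.ofList ds).countP (fun c => decide (1 < ds.count c)) := by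
      have h1 : (PySem.Set.ofList sds).countP (fun c => decide (1 < sds.count c))
          = (PySem.Set.ofList sds).countP (fun c => decide (1 < ds.count c)) :=
        List.countP_congr (fun c _ => by simp [hcnt c])
      rw [h1]
      exact countP_eq_of_mem_iff _ _ (PySem.Set.nodup_ofList sds) (PySem.Set.nodup_ofList ds) hmm _
    -- reduce A side to countP over Nat counts and close with `bridge`
    have e1 : ((List.range 10).countP
        (fun a : Nat => decide (PySem.List.pyGetD tabF (a : Int) 0 = 1)))
        = (List.range 10).countP (fun d => decide ((pdigs n).count d = 1)) := by
      apply List.countP_congr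
      intro a ha
      rw [PySem.List.pyGetD_natCast, hgetD a (by simpa using ha)]
      simp
    have e2 : ((List.range 10).countP
        (fun a : Nat => decide (PySem.List.pyGetD tabF (a : Int) 0 > 1)))
        = (List.range 10).countP (fun d => decide (1 < (pdigs n).count d)) := by
      apply List.countP_congr
      intro a ha
      rw [PySem.List.pyGetD_natCast, hgetD a (by simpa using ha)]
      simp
    have hb1 := bridge n (fun m : Nat => decide (m = 1)) (by decide)
    have hb2 := bridge n (fun m : Nat => decide (1 < m)) (by decide)
    rw [← hds] at hb1 hb2
    simp only [e1, e2, hc1, hc2]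
    rw [← hb1, ← hb2]
  · have hA0 : convertLoop num (List.replicate 10 0) = List.replicate 10 0 := by
      rw [convertLoop, dif_neg hpos]
    rw [hA0, if_neg hpos]
    have hz : runScan ([] : List Char) 0 0 = (0, 0) := by rw [runScan]
    rw [hz]
    congr 1

-- ===== VERDICT (by name: the statement is the Claim_ definition above) =====
theorem convert_spec : Claim_equal_convert := by
  intro num _
  exact convert_spec_aux num
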